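-- pv_equiv track=rewrite | github.com/lequycong204/second_language_python | Midterm B1/Base.py | find_abundant_number
-- ===== SOURCE A (Python) =====
-- def find_abundant_number(matrix):
--     """
--     matrix là một danh sách gồm n phần tử trong đó mỗi phần tử là một danh sách n số nguyên.
--     Có thể hình dung matrix như một ma trận vuông có số chiều là (n, n).
--
--     Hãy tìm và trả về theo thứ tự tăng dần về giá trị các số dư thừa nằm trong
--     MA TRẬN TAM GIÁC DƯỚI của matrix
--
--     Số dư thừa là số có tổng các ước (không tính chính nó) lớn hơn
--     số đó.
--     Ví dụ: 12 là số dư thừa do (1 + 2 + 3 + 4 + 6) > 12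
--     18 là số dư thừa do (1 + 2 + 3 + 6 + 9) > 18
--
--     Ví dụ:
--     input: [[10, 91, 55, 53, 89],
--            [57, 28, 45, 19, 74],
--            [32, 41, 84, 93, 62],
--            [28, 74, 66, 46, 29],
--            [37, 12, 69, 97, 1]]
--
--     output: [12, 66, 84]
--     """
--
--     elements = []
--     for i in range(len(matrix)):
--         for j in range(len(matrix[i])):
--             if i >= j:
--                 elements.append(matrix[i][j])
--     def is_abundant(n):
--         if n < 1:
--             return False
--         sum = 0
--         for i in range(1, n):
--             if n % i == 0:
--                 sum += i
--         return sum > n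
--     elements = [x for x in elements if is_abundant(x)]
--     elements.sort()
--     return elements
-- ===== SOURCE B (Python) =====
-- def find_abundant_number(matrix):
--     def is_abundant(n):
--         if n < 1:
--             return False
--         total = 0
--         i = 1
--         while i * i <= n:
--             if n % i == 0:
--                 total += i
--                 q = n // i
--                 if q != i:
--                     total += q
--             i += 1
--         return total - n > n
--     return sorted(x for i, row in enumerate(matrix) for x in row[:i + 1] if is_abundant(x))
-- ===== Notes on version B (the rewrite author's own statement) =====
-- stated objective: faster
-- what changed: The divisor-sum test now iterates only up to sqrt(n), adding each divisor pair (i, n//i) at once, and the lower triangle is collected by enumerate + row slicing instead of nested index loops with an index comparison.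
import Mathlib
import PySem

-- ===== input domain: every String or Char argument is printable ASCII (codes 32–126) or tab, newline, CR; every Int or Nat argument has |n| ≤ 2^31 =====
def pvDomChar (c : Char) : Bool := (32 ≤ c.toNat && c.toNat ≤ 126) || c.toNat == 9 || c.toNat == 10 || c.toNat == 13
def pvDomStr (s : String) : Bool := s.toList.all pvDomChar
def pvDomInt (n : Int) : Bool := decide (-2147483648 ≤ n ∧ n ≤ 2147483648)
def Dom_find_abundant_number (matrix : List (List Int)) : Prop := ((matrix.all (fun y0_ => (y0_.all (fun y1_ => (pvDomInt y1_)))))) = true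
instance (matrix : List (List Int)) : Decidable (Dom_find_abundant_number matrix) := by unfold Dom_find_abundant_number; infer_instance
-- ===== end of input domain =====

-- B replaces A's per-number trial sum over range(1, n) by the paired-divisor loop up to √n
-- and collects the lower triangle by enumerate + row slicing (objective: faster).

-- ===== PORT A =====
-- A's inner helper is_abundant: trial division over range(1, n)
def pyIsAbundant (n : Int) : Bool :=
  if n < 1 then false
  else
    let s := (PySem.List.pyRange 1 n 1).foldl
      (fun acc i => if PySem.Int.mod n i = 0 then acc + i else acc) 0
    decide (s > n)

def find_abundant_number (matrix : List (List Int)) : List Int :=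
  let elements :=
    (PySem.List.pyRange 0 (matrix.length : Int) 1).foldl (fun acc i =>
      (PySem.List.pyRange 0 ((PySem.List.pyGetD matrix i []).length : Int) 1).foldl
        (fun acc2 j =>
          if i ≥ j then acc2 ++ [PySem.List.pyGetD (PySem.List.pyGetD matrix i []) j 0]
          else acc2) acc) []
  PySem.List.sorted (elements.filter pyIsAbundant) id false

-- ===== PORT B =====
-- B's while loop: i from 1 while i*i ≤ n, adding the divisor pair (i, n//i)
def altDivSum (n : Int) (i : Int) (total : Int) : Int :=
  if i * i ≤ n then
    altDivSum n (i + 1)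
      (if PySem.Int.mod n i = 0 then
        total + i + (if PySem.Int.floordiv n i ≠ i then PySem.Int.floordiv n i else 0)
       else total)
  else total
termination_by (n + 1 - i).toNat
decreasing_by
  rename_i h
  have hin : i ≤ n := by nlinarith
  omega

def altIsAbundant (n : Int) : Bool :=
  if n < 1 then false
  else decide (altDivSum n 1 0 - n > n)

def find_abundant_number_alt (matrix : List (List Int)) : List Int :=
  PySem.List.sorted
    ((PySem.List.enumerate matrix 0).flatMap
      (fun p => (PySem.List.slice p.2 none (some (p.1 + 1))).filter altIsAbundant))
    id false

-- ===== PRECONDITION & SPEC =====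
def Spec_find_abundant_number (matrix : List (List Int)) (out : List Int) : Prop := out = find_abundant_number_alt matrix
instance (matrix : List (List Int)) (out : List Int) : Decidable (Spec_find_abundant_number matrix out) := by unfold Spec_find_abundant_number; infer_instance

-- ===== CLAIM (what is proved, stated in full; the proofs are below) =====
def Claim_equal_find_abundant_number : Prop := ∀ (matrix : List (List Int)), Dom_find_abundant_number matrix → Spec_find_abundant_number matrix (find_abundant_number matrix)

-- ===== LEMMAS AND PROOFS =====

theorem map_range_getD (row : List Int) (n : Nat) (h : n ≤ row.length) :
    (List.range n).map (fun k => row.getD k 0) = row.take n := by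
  apply List.ext_getElem
  · simp [h]
  · intro i h1 h2
    simp at h1 ⊢
    rw [List.getElem?_eq_getElem (by omega)]
    rfl

-- A's inner index loop over one row collects row[:i+1]
theorem inner_take (row : List Int) (i : Int) (hi : 0 ≤ i) (acc : List Int) :
    (PySem.List.pyRange 0 ((row.length : Int)) 1).foldl
      (fun acc2 j => if i ≥ j then acc2 ++ [PySem.List.pyGetD row j 0] else acc2) acc
    = acc ++ row.take (i + 1).toNat := by
  rw [PySem.List.foldl_append_ite (fun j => i ≥ j) (fun j => PySem.List.pyGetD row j 0)]
  congr 1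
  have hc0 : (0:Int) ≤ min (i+1) (row.length : Int) := by omega
  have hcl : min (i+1) (row.length : Int) ≤ (row.length : Int) := by omega
  rw [PySem.List.pyRange_one_append 0 (min (i+1) (row.length:Int)) (row.length:Int) hc0 hcl,
    List.filter_append]
  rw [List.filter_eq_self.mpr (by
    intro j hj
    have := PySem.List.mem_pyRange_one.mp hj
    simp; omega)]
  rw [List.filter_eq_nil_iff.mpr (by
    intro j hj
    have := PySem.List.mem_pyRange_one.mp hj
    simp; omega)]
  rw [List.append_nil]
  have : min (i+1) (row.length:Int) = ((min (i+1) (row.length:Int)).toNat : Int) := by omega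
  rw [this, PySem.List.pyRange_zero_natCast, List.map_map]
  have heq : ((fun j => PySem.List.pyGetD row j 0) ∘ fun (k:Nat) => (k:Int)) = fun k => row.getD k 0 := by
    funext k; simp [PySem.List.pyGetD_natCast]
  rw [heq, map_range_getD row _ (by omega)]
  rw [List.take_eq_take_min, List.take_eq_take_min (i := (i+1).toNat)]
  congr 1
  omega

-- the lower triangle collected by A's index loops = B's enumerate/slice version
theorem triangle_eq (matrix : List (List Int)) :
    (PySem.List.pyRange 0 (matrix.length : Int) 1).foldl (fun acc i =>
      (PySem.List.pyRange 0 ((PySem.List.pyGetD matrix i []).length : Int) 1).foldl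
        (fun acc2 j =>
          if i ≥ j then acc2 ++ [PySem.List.pyGetD (PySem.List.pyGetD matrix i []) j 0]
          else acc2) acc) []
    = (PySem.List.enumerate matrix 0).flatMap
        (fun p => PySem.List.slice p.2 none (some (p.1 + 1))) := by
  rw [PySem.List.enumerate_eq_map_pyRange matrix []]
  simp only [PySem.List.len_eq]
  rw [PySem.List.pyRange_zero_natCast, List.foldl_map, List.flatMap_map]
  rw [PySem.List.foldl_congr_mem _ _
      (fun acc (k : Nat) => acc ++ (PySem.List.pyGetD matrix (k:Int) []).take ((k:Int)+1).toNat) _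
      (by
        intro acc k _
        exact inner_take (PySem.List.pyGetD matrix (k:Int) []) (k:Int) (by positivity) acc)]
  rw [PySem.List.foldl_append_eq_flatMap]
  simp only [List.nil_append]
  rw [List.flatMap_map]
  apply List.flatMap_congr
  intro k _
  rw [PySem.List.slice_to _ (by positivity)]

-- the amount B's loop adds at step j, as a function of j and N = n.toNat
def pairContrib (N j : ℕ) : ℕ :=
  if j ∣ N then j + (if N / j ≠ j then N / j else 0) else 0

-- A's trial sum equals the sum of the proper divisors of n.toNat
theorem pyA_sum (n : Int) (hn : 1 ≤ n) :
    (PySem.List.pyRange 1 n 1).foldl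
      (fun acc i => if PySem.Int.mod n i = 0 then acc + i else acc) 0
    = ((∑ d ∈ (n.toNat).properDivisors, d : ℕ) : Int) := by
  have hb : (fun (acc i : Int) => if PySem.Int.mod n i = 0 then acc + i else acc)
      = fun acc i => acc + (if PySem.Int.mod n i = 0 then i else 0) := by
    funext acc i; split_ifs <;> simp
  rw [hb, PySem.List.foldl_add, PySem.List.pyRange_one, List.map_map]
  rw [Nat.properDivisors]
  rw [Finset.sum_filter, Finset.sum_Ico_eq_sum_range]
  rw [show ∑ i ∈ Finset.range (n.toNat - 1), (if (1 + i) ∣ n.toNat then 1 + i else 0)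
      = ((List.range (n.toNat - 1)).map (fun i => if (1 + i) ∣ n.toNat then 1 + i else 0)).sum from rfl]
  rw [show (n - 1).toNat = n.toNat - 1 by omega]
  rw [Nat.cast_list_sum, List.map_map, zero_add]
  congr 1
  apply List.map_congr_left
  intro k _
  simp only [Function.comp_apply]
  have hdvd : PySem.Int.mod n (1 + (k:Int)) = 0 ↔ (1 + k) ∣ n.toNat := by
    rw [PySem.Int.mod_eq_zero_iff_dvd]
    rw [show n = ((n.toNat : ℕ) : Int) by omega, show (1 + (k:Int)) = (((1+k : ℕ)) : Int) by push_cast; ring]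
    exact Int.natCast_dvd_natCast
  split_ifs with h1 h2
  · push_cast; ring
  · exact absurd (hdvd.mp h1) h2
  · rename_i h3
    exact absurd (hdvd.mpr h3) h1
  · rfl

-- B's loop from i with fuel m: it adds the pair contributions of j = i, …, ⌊√n⌋
theorem altDivSum_loop (n : Int) (hn : 1 ≤ n) :
    ∀ (m : ℕ) (i total : Int), 1 ≤ i → (n + 1 - i).toNat ≤ m →
    altDivSum n i total
      = total + ((∑ j ∈ Finset.Ico i.toNat (n.toNat.sqrt + 1), pairContrib n.toNat j : ℕ) : Int) := by
  intro m
  induction m with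
  | zero =>
    intro i total hi hm
    have hge : n + 1 ≤ i := by omega
    rw [altDivSum, if_neg (by nlinarith [sq_nonneg (i - 1)])]
    rw [Finset.Ico_eq_empty (by
      have : n.toNat.sqrt ≤ n.toNat := Nat.sqrt_le_self _
      omega)]
    simp
  | succ m ih =>
    intro i total hi hm
    rw [altDivSum]
    have hni : n = ((n.toNat : ℕ) : Int) := by omega
    have hii : i = ((i.toNat : ℕ) : Int) := by omega
    by_cases hcase : i * i ≤ n
    · rw [if_pos hcase]
      have hin : i ≤ n := by nlinarith
      rw [ih (i+1) _ (by omega) (by omega)]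
      have hnat : i.toNat * i.toNat ≤ n.toNat := by
        have h' : ((i.toNat * i.toNat : ℕ) : Int) ≤ ((n.toNat : ℕ) : Int) := by
          push_cast
          rw [← hii, ← hni]
          exact hcase
        exact_mod_cast h'
      have hsq : i.toNat < n.toNat.sqrt + 1 := by
        have := Nat.le_sqrt.mpr hnat
        omega
      rw [Finset.sum_eq_sum_Ico_succ_bot hsq, show (i + 1).toNat = i.toNat + 1 by omega]
      have hdvd : PySem.Int.mod n i = 0 ↔ i.toNat ∣ n.toNat := by
        conv_lhs => rw [PySem.Int.mod_eq_zero_iff_dvd, hni, hii]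
        exact Int.natCast_dvd_natCast
      have hfd : PySem.Int.floordiv n i = ((n.toNat / i.toNat : ℕ) : Int) := by
        conv_lhs => rw [hni, hii]
        rw [PySem.Int.floordiv_natCast]
      have hstep : (if PySem.Int.mod n i = 0 then
            total + i + (if PySem.Int.floordiv n i ≠ i then PySem.Int.floordiv n i else 0)
          else total) = total + (pairContrib n.toNat i.toNat : Int) := by
        unfold pairContrib
        rw [hfd]
        by_cases h1 : i.toNat ∣ n.toNat
        · rw [if_pos (hdvd.mpr h1), if_pos h1]
          by_cases h2 : n.toNat / i.toNat = i.toNat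
          · rw [if_neg (by rw [h2, ← hii]; simp), if_neg (not_not_intro h2)]
            push_cast
            omega
          · rw [if_pos (by rw [hii]; exact_mod_cast h2), if_pos h2]
            push_cast
            omega
        · rw [if_neg (fun hc => h1 (hdvd.mp hc)), if_neg h1]
          simp
      rw [hstep]
      push_cast
      ring
    · rw [if_neg hcase]
      have hgt : n.toNat.sqrt + 1 ≤ i.toNat := by
        have h2 : n.toNat < i.toNat * i.toNat := by
          by_contra hc
          push Not at hc
          apply hcase
          calc i * i = ((i.toNat * i.toNat : ℕ) : Int) := by push_cast; rw [← hii]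
          _ ≤ ((n.toNat : ℕ) : Int) := by exact_mod_cast hc
          _ = n := by omega
        have := Nat.sqrt_lt.mpr h2
        omega
      rw [Finset.Ico_eq_empty (by omega)]
      simp

-- the paired contributions up to √N sum to the full divisor sum of N
theorem pair_sum (N : ℕ) (hN : 1 ≤ N) :
    ∑ j ∈ Finset.Ico 1 (N.sqrt + 1), pairContrib N j = ∑ d ∈ N.divisors, d := by
  unfold pairContrib
  rw [← Finset.sum_filter]
  have hS : (Finset.Ico 1 (N.sqrt + 1)).filter (· ∣ N)
      = N.divisors.filter (fun d => d * d ≤ N) := by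
    ext d
    simp only [Finset.mem_filter, Finset.mem_Ico, Nat.mem_divisors]
    constructor
    · rintro ⟨⟨h1, h2⟩, h3⟩
      exact ⟨⟨h3, by omega⟩, Nat.le_sqrt.mp (by omega)⟩
    · rintro ⟨⟨h1, h2⟩, h3⟩
      exact ⟨⟨Nat.pos_of_dvd_of_pos h1 (by omega), by have := Nat.le_sqrt.mpr h3; omega⟩, h1⟩
  rw [hS, Finset.sum_add_distrib, ← Finset.sum_filter]
  have hS2 : (N.divisors.filter (fun d => d * d ≤ N)).filter (fun j => N / j ≠ j)
      = N.divisors.filter (fun d => d * d < N) := by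
    ext d
    simp only [Finset.mem_filter, Nat.mem_divisors, ne_eq]
    constructor
    · rintro ⟨⟨⟨h1, h2⟩, h3⟩, h4⟩
      refine ⟨⟨h1, h2⟩, ?_⟩
      rcases Nat.lt_or_ge (d * d) N with h | h
      · exact h
      · exfalso
        apply h4
        have hdd : d * d = N := by omega
        have hd0 : 0 < d := Nat.pos_of_dvd_of_pos h1 (by omega)
        rw [← hdd, Nat.mul_div_cancel_left d hd0]
    · rintro ⟨⟨h1, h2⟩, h3⟩
      have hd0 : 0 < d := Nat.pos_of_dvd_of_pos h1 (by omega)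
      refine ⟨⟨⟨h1, h2⟩, by omega⟩, ?_⟩
      intro hc
      have : d * (N / d) = N := Nat.mul_div_cancel' h1
      rw [hc] at this
      omega
  rw [hS2]
  have hbij : ∑ d ∈ N.divisors.filter (fun d => d * d < N), N / d
      = ∑ e ∈ N.divisors.filter (fun e => N < e * e), e := by
    apply Finset.sum_nbij' (fun d => N / d) (fun e => N / e)
    · intro a ha
      simp only [Finset.mem_filter, Nat.mem_divisors] at ha ⊢
      obtain ⟨⟨h1, h2⟩, h3⟩ := ha
      have ha0 : 0 < a := Nat.pos_of_dvd_of_pos h1 (by omega)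
      have hmul : a * (N / a) = N := Nat.mul_div_cancel' h1
      have hlt : a < N / a := by
        by_contra hc
        push Not at hc
        nlinarith
      refine ⟨⟨Nat.div_dvd_of_dvd h1, h2⟩, ?_⟩
      nlinarith
    · intro e he
      simp only [Finset.mem_filter, Nat.mem_divisors] at he ⊢
      obtain ⟨⟨h1, h2⟩, h3⟩ := he
      have he0 : 0 < e := Nat.pos_of_dvd_of_pos h1 (by omega)
      have hmul : e * (N / e) = N := Nat.mul_div_cancel' h1
      have hq0 : 0 < N / e := Nat.div_pos (Nat.le_of_dvd (by omega) h1) he0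
      have hlt : N / e < e := by
        by_contra hc
        push Not at hc
        nlinarith
      refine ⟨⟨Nat.div_dvd_of_dvd h1, h2⟩, ?_⟩
      nlinarith
    · intro a ha
      simp only [Finset.mem_filter, Nat.mem_divisors] at ha
      exact Nat.div_div_self ha.1.1 (by omega)
    · intro e he
      simp only [Finset.mem_filter, Nat.mem_divisors] at he
      exact Nat.div_div_self he.1.1 (by omega)
    · intro a _
      rfl
  rw [hbij]
  have := Finset.sum_filter_add_sum_filter_not N.divisors (fun d => d * d ≤ N) (fun d => d)
  rw [← this]
  congr 1
  apply Finset.sum_congr _ (fun _ _ => rfl)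
  ext d
  simp only [Finset.mem_filter, Nat.mem_divisors]
  omega

-- the two abundance tests agree on every integer
theorem abundant_eq : pyIsAbundant = altIsAbundant := by
  funext n
  unfold pyIsAbundant altIsAbundant
  by_cases h : n < 1
  · rw [if_pos h, if_pos h]
  · rw [if_neg h, if_neg h]
    have hn : 1 ≤ n := by omega
    have h1 := pyA_sum n hn
    have h2 := altDivSum_loop n hn n.toNat 1 0 (le_refl 1) (by omega)
    rw [zero_add, show (1:Int).toNat = 1 from rfl, pair_sum n.toNat (by omega)] at h2
    rw [h1, h2]
    have hσ : ∑ d ∈ (n.toNat).divisors, d = ∑ d ∈ (n.toNat).properDivisors, d + n.toNat :=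
      Nat.sum_divisors_eq_sum_properDivisors_add_self.symm ▸ rfl
    apply decide_eq_decide.mpr
    rw [hσ]
    push_cast
    omega

-- ===== VERDICT (by name: the statement is the Claim_ definition above) =====
theorem find_abundant_number_spec : Claim_equal_find_abundant_number := by
  intro matrix _
  unfold Spec_find_abundant_number find_abundant_number find_abundant_number_alt
  rw [triangle_eq, abundant_eq]
  simp [List.filter_flatMap]
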